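-- pv_equiv track=rewrite | github.com/yht0827/coding-test | Eunleelee/2024-01/1월 28일/방금그곡.py | solution
-- ===== SOURCE A (Python) =====
-- def solution(m, musicinfos):
--     m = m.replace('A#', 'H').replace('C#', 'I').replace('D#', 'J').replace('F#', 'K').replace('G#', 'L')
--     music_info = []
--
--     for num, musicinfo in enumerate(musicinfos):
--         start, end, name, music = musicinfo.split(',')
--
--         music = music.replace('A#', 'H').replace('C#', 'I').replace('D#', 'J').replace('F#', 'K').replace('G#', 'L')
--         music_len = (int(end[:2]) * 60 + int(end[3:])) - (int(start[:2]) * 60 + int(start[3:]))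
--
--         if len(music) < music_len:
--             music += music * (music_len // len(music)) + music[:(music_len % len(music))]
--         elif len(music) > music_len:
--             music = music[:music_len]
--
--         if m in music:
--             music_info.append([music_len, name, num])
--
--     if len(music_info) == 0:
--         return "(None)"
--
--     if len(music_info) != 1:
--         music_info = sorted(music_info, key = lambda x : (-x[0], x[2]))
--
--     return music_info[0][1]
-- ===== SOURCE B (Python) =====
-- def _norm(s):
--     for old, new in (('A#', 'H'), ('C#', 'I'), ('D#', 'J'), ('F#', 'K'), ('G#', 'L')):
--         s = s.replace(old, new)
--     return s
--
--
-- def _match_len(m, musicinfo):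
--     start, end, name, music = musicinfo.split(',')
--     music = _norm(music)
--     music_len = (int(end[:2]) * 60 + int(end[3:])) - (int(start[:2]) * 60 + int(start[3:]))
--     if len(music) < music_len:
--         music += music * (music_len // len(music)) + music[:(music_len % len(music))]
--     elif len(music) > music_len:
--         music = music[:music_len]
--     return (music_len, name) if m in music else None
--
--
-- def solution(m, musicinfos):
--     m = _norm(m)
--     best_len, best_name = None, "(None)"
--     for musicinfo in musicinfos:
--         hit = _match_len(m, musicinfo)
--         if hit is not None and (best_len is None or hit[0] > best_len):
--             best_len, best_name = hit
--     return best_name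
-- ===== Notes on version B (the rewrite author's own statement) =====
-- stated objective: simpler
-- what changed: Instead of collecting all matches into a list and sorting it by (-length, index) to pick the winner, B threads a running best (strictly greater length wins, so the earliest match keeps ties) through a single pass and never builds or sorts the match list.
import Mathlib
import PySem

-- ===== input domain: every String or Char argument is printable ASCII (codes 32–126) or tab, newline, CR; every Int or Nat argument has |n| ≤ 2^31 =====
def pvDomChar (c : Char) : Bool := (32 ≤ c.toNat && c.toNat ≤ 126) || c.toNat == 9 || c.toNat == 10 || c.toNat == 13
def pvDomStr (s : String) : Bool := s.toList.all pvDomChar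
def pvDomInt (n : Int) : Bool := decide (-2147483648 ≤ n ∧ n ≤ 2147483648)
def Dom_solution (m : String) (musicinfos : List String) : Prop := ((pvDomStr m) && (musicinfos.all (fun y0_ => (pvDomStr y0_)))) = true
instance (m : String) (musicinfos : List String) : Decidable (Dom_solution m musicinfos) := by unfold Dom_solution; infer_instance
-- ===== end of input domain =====

-- B replaces A's collect-all-matches-then-sort-by-(-len,index) with a single pass that keeps a
-- running best (strictly longer wins, so the earliest match keeps ties); the per-record melody
-- building is the same.

-- ===== PORT A =====
def solution (m : String) (musicinfos : List String) : String :=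
  let m' := PySem.Chars.replace (PySem.Chars.replace (PySem.Chars.replace (PySem.Chars.replace
    (PySem.Chars.replace m.toList "A#".toList "H".toList) "C#".toList "I".toList)
    "D#".toList "J".toList) "F#".toList "K".toList) "G#".toList "L".toList
  let music_info : List (Int × String × Int) :=
    (PySem.List.enumerate musicinfos).foldl (fun acc p =>
      match PySem.Str.split? p.2 "," with
      | some [start, end_, name, music] =>
        let mus := PySem.Chars.replace (PySem.Chars.replace (PySem.Chars.replace (PySem.Chars.replace
          (PySem.Chars.replace music.toList "A#".toList "H".toList) "C#".toList "I".toList)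
          "D#".toList "J".toList) "F#".toList "K".toList) "G#".toList "L".toList
        let music_len : Int :=
          ((PySem.Int.ofStr? (PySem.Str.slice end_ none (some 2))).getD 0 * 60
            + (PySem.Int.ofStr? (PySem.Str.slice end_ (some 3) none)).getD 0)
          - ((PySem.Int.ofStr? (PySem.Str.slice start none (some 2))).getD 0 * 60
            + (PySem.Int.ofStr? (PySem.Str.slice start (some 3) none)).getD 0)
        let mus := if ((mus.length : Int) < music_len) then
            mus ++ (PySem.List.pyRepeat mus (PySem.Int.floordiv music_len (mus.length : Int))
              ++ PySem.List.slice mus none (some (PySem.Int.mod music_len (mus.length : Int))))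
          else if ((mus.length : Int) > music_len) then PySem.List.slice mus none (some music_len)
          else mus
        if PySem.Chars.isIn m' mus then acc ++ [(music_len, name, p.1)] else acc
      | _ => acc) []
  if music_info.length = 0 then "(None)"
  else
    let music_info := if music_info.length ≠ 1 then
        PySem.List.sorted2 music_info (fun x => -x.1) (fun x => x.2.2)
      else music_info
    (music_info.headD (0, "", 0)).2.1

-- ===== PORT B =====
-- Source B's _norm: fold the five (old, new) replacement pairs over the string
-- Source B's loop over the five (old, new) pairs, unrolled over the constant pair list
def normB (s : List Char) : List Char :=
  PySem.Chars.replace (PySem.Chars.replace (PySem.Chars.replace (PySem.Chars.replace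
    (PySem.Chars.replace s "A#".toList "H".toList) "C#".toList "I".toList)
    "D#".toList "J".toList) "F#".toList "K".toList) "G#".toList "L".toList

-- Source B's _match_len: the (music_len, name) of a matching record, none if no match
def matchLen (m' : List Char) (musicinfo : String) : Option (Int × String) :=
  match PySem.Str.split? musicinfo "," with
  | none => none
  | some parts =>
    -- unpack the exactly-4 fields, one cons at a time
    match parts with
    | [] => none
    | start :: parts1 =>
      match parts1 with
      | [] => none
      | end_ :: parts2 =>
        match parts2 with
        | [] => none
        | name :: parts3 =>
          match parts3 with
          | [] => none
          | music :: parts4 =>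
          match parts4 with
          | _ :: _ => none
          | [] =>
            let mus := normB music.toList
            let music_len : Int :=
              ((PySem.Int.ofStr? (PySem.Str.slice end_ none (some 2))).getD 0 * 60
                + (PySem.Int.ofStr? (PySem.Str.slice end_ (some 3) none)).getD 0)
              - ((PySem.Int.ofStr? (PySem.Str.slice start none (some 2))).getD 0 * 60
                + (PySem.Int.ofStr? (PySem.Str.slice start (some 3) none)).getD 0)
            let mus := if ((mus.length : Int) < music_len) then
                mus ++ (PySem.List.pyRepeat mus (PySem.Int.floordiv music_len (mus.length : Int))
                  ++ PySem.List.slice mus none (some (PySem.Int.mod music_len (mus.length : Int))))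
              else if ((mus.length : Int) > music_len) then PySem.List.slice mus none (some music_len)
              else mus
            if PySem.Chars.isIn m' mus then some (music_len, name) else none

def solution_alt (m : String) (musicinfos : List String) : String :=
  let m' := normB m.toList
  (musicinfos.foldl (fun st info =>
    match matchLen m' info with
    | some hit =>
      match st.1 with
      | none => (some hit.1, hit.2)
      | some bl => if hit.1 > bl then (some hit.1, hit.2) else st
    | none => st) ((none : Option Int), "(None)")).2

-- ===== PRECONDITION & SPEC =====
-- Pre_ excludes exactly the inputs where the Python A raises: a record that does not split into
-- exactly 4 comma-separated fields (unpacking ValueError), time fields whose [:2]/[3:] slices do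
-- not parse as int (ValueError), and an empty melody with a positive duration (ZeroDivisionError).
def recordOk (info : String) : Bool :=
  match PySem.Str.split? info "," with
  | none => false
  | some parts =>
    match parts with
    | [] => false
    | start :: parts1 =>
      match parts1 with
      | [] => false
      | end_ :: parts2 =>
        match parts2 with
        | [] => false
        | _ :: parts3 =>
          match parts3 with
          | [] => false
          | music :: parts4 =>
          match parts4 with
          | _ :: _ => false
          | [] =>
            match PySem.Int.ofStr? (PySem.Str.slice start none (some 2)) with
            | none => false
            | some a =>
            match PySem.Int.ofStr? (PySem.Str.slice start (some 3) none) with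
            | none => false
            | some b =>
            match PySem.Int.ofStr? (PySem.Str.slice end_ none (some 2)) with
            | none => false
            | some c =>
            match PySem.Int.ofStr? (PySem.Str.slice end_ (some 3) none) with
            | none => false
            | some d =>
              !((decide ((normB music.toList).length = 0)) && (decide ((0 : Int) < (c * 60 + d) - (a * 60 + b))))

def Pre_solution (m : String) (musicinfos : List String) : Prop :=
  (musicinfos.all recordOk) = true
instance (m : String) (musicinfos : List String) : Decidable (Pre_solution m musicinfos) := by
  unfold Pre_solution; infer_instance

def pvWitness_solution : String × List String :=
  ("ABC", ["00:00,00:03,song,ABC", "00:00,00:02,tune,CC"])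

def Spec_solution (m : String) (musicinfos : List String) (out : String) : Prop := out = solution_alt m musicinfos
instance (m : String) (musicinfos : List String) (out : String) : Decidable (Spec_solution m musicinfos out) := by unfold Spec_solution; infer_instance

-- ===== CLAIM (what is proved, stated in full; the proofs are below) =====
def Claim_equal_solution : Prop := ∀ (m : String) (musicinfos : List String), Dom_solution m musicinfos → Pre_solution m musicinfos → Spec_solution m musicinfos (solution m musicinfos)

-- ===== LEMMAS AND PROOFS =====

-- the matched records of a list of infos, numbered from k
def hits (m' : List Char) (infos : List String) (k : Int) : List (Int × String × Int) :=
  match infos with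
  | [] => []
  | info :: t =>
    (match matchLen m' info with
     | some hit => [(hit.1, hit.2, k)]
     | none => []) ++ hits m' t (k + 1)

set_option maxHeartbeats 1000000 in
lemma stepA_eq (m' : List Char) (info : String) (num : Int)
    (acc : List (Int × String × Int)) :
    (match PySem.Str.split? info "," with
      | some [start, end_, name, music] =>
        let mus := PySem.Chars.replace (PySem.Chars.replace (PySem.Chars.replace (PySem.Chars.replace
          (PySem.Chars.replace music.toList "A#".toList "H".toList) "C#".toList "I".toList)
          "D#".toList "J".toList) "F#".toList "K".toList) "G#".toList "L".toList
        let music_len : Int :=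
          ((PySem.Int.ofStr? (PySem.Str.slice end_ none (some 2))).getD 0 * 60
            + (PySem.Int.ofStr? (PySem.Str.slice end_ (some 3) none)).getD 0)
          - ((PySem.Int.ofStr? (PySem.Str.slice start none (some 2))).getD 0 * 60
            + (PySem.Int.ofStr? (PySem.Str.slice start (some 3) none)).getD 0)
        let mus := if ((mus.length : Int) < music_len) then
            mus ++ (PySem.List.pyRepeat mus (PySem.Int.floordiv music_len (mus.length : Int))
              ++ PySem.List.slice mus none (some (PySem.Int.mod music_len (mus.length : Int))))
          else if ((mus.length : Int) > music_len) then PySem.List.slice mus none (some music_len)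
          else mus
        if PySem.Chars.isIn m' mus then acc ++ [(music_len, name, num)] else acc
      | _ => acc)
    = acc ++ (match matchLen m' info with
       | some hit => [(hit.1, hit.2, num)]
       | none => []) := by
  unfold matchLen normB
  cases h : PySem.Str.split? info "," with
  | none => simp
  | some l =>
    rcases l with _ | ⟨s, _ | ⟨e, _ | ⟨n, _ | ⟨mu, _ | _⟩⟩⟩⟩
    · first | rfl | simp
    · first | rfl | simp
    · first | rfl | simp
    · first | rfl | simp
    · dsimp only

      generalize (PySem.Chars.replace (PySem.Chars.replace (PySem.Chars.replace (PySem.Chars.replace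
        (PySem.Chars.replace mu.toList "A#".toList "H".toList) "C#".toList "I".toList)
        "D#".toList "J".toList) "F#".toList "K".toList) "G#".toList "L".toList) = M
      generalize ((PySem.Int.ofStr? (PySem.Str.slice e none (some 2))).getD 0 * 60
            + (PySem.Int.ofStr? (PySem.Str.slice e (some 3) none)).getD 0
          - ((PySem.Int.ofStr? (PySem.Str.slice s none (some 2))).getD 0 * 60
            + (PySem.Int.ofStr? (PySem.Str.slice s (some 3) none)).getD 0) : Int) = ml
      repeat' split
      all_goals first | rfl | simp_all
      all_goals rename_i heq
      all_goals subst heq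
      all_goals exact ⟨rfl, rfl⟩
    · first | rfl | simp

lemma foldA_eq (m' : List Char) (infos : List String) :
    ∀ (k : Int) (acc : List (Int × String × Int)),
    (PySem.List.enumerate infos k).foldl (fun acc p =>
      match PySem.Str.split? p.2 "," with
      | some [start, end_, name, music] =>
        let mus := PySem.Chars.replace (PySem.Chars.replace (PySem.Chars.replace (PySem.Chars.replace
          (PySem.Chars.replace music.toList "A#".toList "H".toList) "C#".toList "I".toList)
          "D#".toList "J".toList) "F#".toList "K".toList) "G#".toList "L".toList
        let music_len : Int :=
          ((PySem.Int.ofStr? (PySem.Str.slice end_ none (some 2))).getD 0 * 60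
            + (PySem.Int.ofStr? (PySem.Str.slice end_ (some 3) none)).getD 0)
          - ((PySem.Int.ofStr? (PySem.Str.slice start none (some 2))).getD 0 * 60
            + (PySem.Int.ofStr? (PySem.Str.slice start (some 3) none)).getD 0)
        let mus := if ((mus.length : Int) < music_len) then
            mus ++ (PySem.List.pyRepeat mus (PySem.Int.floordiv music_len (mus.length : Int))
              ++ PySem.List.slice mus none (some (PySem.Int.mod music_len (mus.length : Int))))
          else if ((mus.length : Int) > music_len) then PySem.List.slice mus none (some music_len)
          else mus
        if PySem.Chars.isIn m' mus then acc ++ [(music_len, name, p.1)] else acc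
      | _ => acc) acc
    = acc ++ hits m' infos k := by
  induction infos with
  | nil => intro k acc; simp [PySem.List.enumerate, hits]
  | cons info t ih =>
    intro k acc
    simp only [PySem.List.enumerate, List.foldl_cons]
    rw [stepA_eq m' info k acc, ih (k + 1)]
    simp [hits]

lemma hits_lb (m' : List Char) (infos : List String) :
    ∀ k, ∀ y ∈ hits m' infos k, k ≤ y.2.2 := by
  induction infos with
  | nil => intro k y hy; simp [hits] at hy
  | cons info t ih =>
    intro k y hy
    simp only [hits, List.mem_append] at hy
    rcases hy with hy | hy
    · cases h : matchLen m' info <;> simp [h] at hy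
      subst hy; simp
    · have := ih (k + 1) y hy; omega

lemma hits_pairwise (m' : List Char) (infos : List String) :
    ∀ k, (hits m' infos k).Pairwise (fun a b => a.2.2 < b.2.2) := by
  induction infos with
  | nil => intro k; simp [hits]
  | cons info t ih =>
    intro k
    simp only [hits]
    refine List.pairwise_append.mpr ⟨?_, ih (k + 1), ?_⟩
    · cases h : matchLen m' info <;> simp
    · intro a ha b hb
      have hb' := hits_lb m' t (k + 1) b hb
      cases h : matchLen m' info <;> simp [h] at ha
      subst ha; simp; omega

-- head of an insertBy-fold is a running "first minimal" selection
lemma headD_foldl_insertBy {α : Type} (before : α → α → Bool) (d : α) (xs : List α) :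
    ∀ (h : α) (t : List α),
    ((xs.foldl (fun acc z => PySem.List.insertBy before z acc) (h :: t))).headD d
    = xs.foldl (fun b y => if before y b then y else b) h := by
  induction xs with
  | nil => intro h t; simp
  | cons z zs ih =>
    intro h t
    simp only [List.foldl_cons]
    have hz : PySem.List.insertBy before z (h :: t)
        = if before z h then z :: h :: t else h :: PySem.List.insertBy before z t := by
      simp [PySem.List.insertBy]
    rw [hz]
    by_cases hb : before z h = true
    · rw [if_pos hb, if_pos hb]; exact ih z (h :: t)
    · rw [if_neg hb, if_neg hb]; exact ih h (PySem.List.insertBy before z t)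

-- under strictly increasing nums the lexicographic (-len, num) test degenerates to a strict > on len
lemma fold_sel_congr (t : List (Int × String × Int)) :
    ∀ (b : Int × String × Int),
    (∀ y ∈ t, b.2.2 < y.2.2) → t.Pairwise (fun a c => a.2.2 < c.2.2) →
    t.foldl (fun b y =>
        if (decide (-y.1 < -b.1) || (!decide (-b.1 < -y.1) && decide (y.2.2 < b.2.2))) then y else b) b
    = t.foldl (fun b y => if b.1 < y.1 then y else b) b := by
  induction t with
  | nil => intro b _ _; rfl
  | cons y t ih =>
    intro b hb hp
    have hnum : b.2.2 < y.2.2 := hb y (by simp)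
    have hcond : (decide (-y.1 < -b.1) || (!decide (-b.1 < -y.1) && decide (y.2.2 < b.2.2)))
        = decide (b.1 < y.1) := by
      by_cases h1 : b.1 < y.1 <;> simp [h1] <;> omega
    simp only [List.foldl_cons, hcond, decide_eq_true_eq]
    have hp' := (List.pairwise_cons.mp hp).2
    have hbranch : ∀ z ∈ t, (if b.1 < y.1 then y else b).2.2 < z.2.2 := by
      intro z hz
      split
      · exact (List.pairwise_cons.mp hp).1 z hz
      · exact hb z (List.mem_cons_of_mem _ hz)
    exact ih _ hbranch hp'

def best2 (l : List (Int × String × Int)) (b : Int × String) : Int × String :=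
  l.foldl (fun c y => if c.1 < y.1 then (y.1, y.2.1) else c) b

-- the triple-level strict-max fold projects to best2
lemma proj_fold (t : List (Int × String × Int)) :
    ∀ (b : Int × String × Int),
    ((t.foldl (fun c y => if c.1 < y.1 then y else c) b).1,
     (t.foldl (fun c y => if c.1 < y.1 then y else c) b).2.1) = best2 t (b.1, b.2.1) := by
  induction t with
  | nil => intro b; rfl
  | cons y t ih =>
    intro b
    simp only [List.foldl_cons, best2] at *
    by_cases h : b.1 < y.1 <;> simp only [h, if_true, if_false] <;> [exact ih y; exact ih b]

-- B's loop from an already-found best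
lemma foldB_some (m' : List Char) (infos : List String) :
    ∀ (k : Int) (b : Int × String),
    infos.foldl (fun st info =>
      match matchLen m' info with
      | some hit =>
        match st.1 with
        | none => (some hit.1, hit.2)
        | some bl => if hit.1 > bl then (some hit.1, hit.2) else st
      | none => st) (some b.1, b.2)
    = (some (best2 (hits m' infos k) b).1, (best2 (hits m' infos k) b).2) := by
  induction infos with
  | nil => intro k b; simp [hits, best2]
  | cons info t ih =>
    intro k b
    simp only [List.foldl_cons, hits]
    cases h : matchLen m' info with
    | none => simp only [h]; rw [ih (k + 1) b]; simp [h, hits]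
    | some hit =>
      simp only [h, List.singleton_append, best2, List.foldl_cons]
      by_cases hlt : b.1 < hit.1
      · simp only [gt_iff_lt, hlt, if_true]
        rw [ih (k + 1) (hit.1, hit.2)]
        simp [best2]
      · simp only [gt_iff_lt, hlt, if_false]
        rw [ih (k + 1) b]
        simp [best2, hlt]

-- B's loop from the initial no-match state
lemma foldB_none (m' : List Char) (infos : List String) :
    ∀ (k : Int),
    infos.foldl (fun st info =>
      match matchLen m' info with
      | some hit =>
        match st.1 with
        | none => (some hit.1, hit.2)
        | some bl => if hit.1 > bl then (some hit.1, hit.2) else st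
      | none => st) ((none : Option Int), "(None)")
    = (match hits m' infos k with
       | [] => ((none : Option Int), "(None)")
       | x :: t => (some (best2 t (x.1, x.2.1)).1, (best2 t (x.1, x.2.1)).2)) := by
  induction infos with
  | nil => intro k; simp [hits]
  | cons info t ih =>
    intro k
    simp only [List.foldl_cons, hits]
    cases h : matchLen m' info with
    | none => simp only [h]; rw [ih (k + 1)]; rfl
    | some hit =>
      simp only [h, List.singleton_append]
      rw [foldB_some m' t (k + 1) (hit.1, hit.2)]

theorem solution_spec : Claim_equal_solution := by
  intro m musicinfos _ _
  unfold Spec_solution solution solution_alt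
  dsimp only
  rw [← show normB m.toList = PySem.Chars.replace (PySem.Chars.replace (PySem.Chars.replace
      (PySem.Chars.replace (PySem.Chars.replace m.toList "A#".toList "H".toList)
      "C#".toList "I".toList) "D#".toList "J".toList) "F#".toList "K".toList)
      "G#".toList "L".toList from rfl]
  set m' := normB m.toList with hm'
  rw [foldA_eq m' musicinfos 0 [], foldB_none m' musicinfos 0]
  simp only [List.nil_append]
  cases hL : hits m' musicinfos 0 with
  | nil => simp
  | cons x t =>
    simp only [List.length_cons]
    cases t with
    | nil => simp [best2]
    | cons y s =>
      have hpw : (x :: y :: s).Pairwise (fun a b => a.2.2 < b.2.2) := by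
        rw [← hL]; exact hits_pairwise m' musicinfos 0
      have hsorted : PySem.List.sorted2 (x :: y :: s) (fun z => -z.1) (fun z => z.2.2)
          = (y :: s).foldl (fun acc z => PySem.List.insertBy
              (fun a b => (decide (-a.1 < -b.1) || (!decide (-b.1 < -a.1) && decide (a.2.2 < b.2.2)))) z acc) [x] := by
        simp [PySem.List.sorted2, PySem.List.insertBy]
      simp only [show (y :: s).length + 1 = 0 ↔ False by simp, if_false,
        show ¬((y :: s).length + 1 = 1) by simp, ne_eq, not_false_eq_true, if_true]
      rw [hsorted, headD_foldl_insertBy _ _ (y :: s) x []]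
      have hfold := fold_sel_congr (y :: s) x
        (fun z hz => (List.pairwise_cons.mp hpw).1 z hz)
        (List.pairwise_cons.mp hpw).2
      rw [hfold]
      have hp := proj_fold (y :: s) x
      simp only [best2] at hp ⊢
      rw [← hp]
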